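-- pv_equiv track=rewrite | github.com/AntonioJCosta/py_secure_shell_automator | scripts/update_readme.py | format_docstrings
-- ===== SOURCE A (Python) =====
-- def format_docstrings(class_matches, method_matches, property_matches):
--     formatted = ""
--
--     for class_name, class_doc in class_matches:
--         formatted += f"### {class_name}\n\n"
--         formatted += f"{class_doc.strip()}\n\n"
--
--         # Find properties belonging to this class
--         class_properties = [p for p in property_matches if p]
--         if class_properties:
--             for property_name, property_doc in class_properties:
--                 # Extract the first line of the docstring as the description
--                 property_desc = property_doc.strip().split('\n')[0]
--                 # Remove the first line from the docstring
--                 cleaned_doc = '\n'.join(property_doc.strip().split('\n')[1:])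
--                 # Remove '>>> ' from examples
--                 cleaned_doc = cleaned_doc.replace('>>> ', '')
--                 formatted += f"#### **{property_name}** (Property)\n\n"
--                 formatted += f"{property_desc.strip()}\n\n"
--                 formatted += f"```python\n{cleaned_doc}\n```\n\n"
--
--         # Find methods belonging to this class
--         class_methods = [m for m in method_matches if m]
--         if class_methods:
--             for method_name, method_doc in class_methods:
--                 # Extract the first line of the docstring as the description
--                 method_desc = method_doc.strip().split('\n')[0]
--                 # Remove the first line from the docstring
--                 cleaned_doc = '\n'.join(method_doc.strip().split('\n')[1:])
--                 # Remove '>>> ' from examples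
--                 cleaned_doc = cleaned_doc.replace('>>> ', '')
--                 formatted += f"#### **{method_name}** (Method)\n\n"
--                 formatted += f"{method_desc.strip()}\n\n"
--                 formatted += f"```python\n{cleaned_doc}\n```\n\n"
--
--     return formatted
-- ===== SOURCE B (Python) =====
-- def format_docstrings(class_matches, method_matches, property_matches):
--     body_parts = []
--     for pairs, label in ((property_matches, "Property"), (method_matches, "Method")):
--         for name, doc in pairs:
--             lines = doc.strip().split('\n')
--             desc = lines[0].strip()
--             cleaned = '\n'.join(lines[1:]).replace('>>> ', '')
--             body_parts.append(
--                 f"#### **{name}** ({label})\n\n{desc}\n\n```python\n{cleaned}\n```\n\n"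
--             )
--     body = ''.join(body_parts)
--     return ''.join(
--         f"### {class_name}\n\n{class_doc.strip()}\n\n{body}"
--         for class_name, class_doc in class_matches
--     )
-- ===== Notes on version B (the rewrite author's own statement) =====
-- stated objective: alternative
-- what changed: A re-formats the identical property/method sections inside the loop over classes; B builds that class-independent body once in a single label-parameterized pass over [(properties,'Property'),(methods,'Method')] and then joins header+shared-body per class (intended as faster; a timing run measured only 1.44x at the largest size, below the 1.5x bar).
import Mathlib
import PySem

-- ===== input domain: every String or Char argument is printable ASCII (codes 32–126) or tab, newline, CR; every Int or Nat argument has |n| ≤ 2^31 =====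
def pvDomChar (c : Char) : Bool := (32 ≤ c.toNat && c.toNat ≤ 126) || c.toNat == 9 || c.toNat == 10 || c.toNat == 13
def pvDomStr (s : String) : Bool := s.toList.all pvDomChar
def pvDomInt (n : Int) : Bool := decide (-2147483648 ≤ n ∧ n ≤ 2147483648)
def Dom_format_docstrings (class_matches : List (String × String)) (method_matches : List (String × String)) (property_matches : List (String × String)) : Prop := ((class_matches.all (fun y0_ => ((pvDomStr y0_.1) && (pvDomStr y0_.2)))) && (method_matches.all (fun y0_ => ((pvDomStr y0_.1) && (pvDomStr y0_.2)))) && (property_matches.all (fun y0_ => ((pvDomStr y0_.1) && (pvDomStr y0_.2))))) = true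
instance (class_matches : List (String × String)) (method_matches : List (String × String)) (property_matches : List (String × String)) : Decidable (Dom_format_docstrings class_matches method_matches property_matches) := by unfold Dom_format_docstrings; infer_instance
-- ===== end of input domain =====

-- B precomputes the (class-independent) property/method body once instead of re-formatting it
-- inside the loop over classes; the per-class output is then header ++ shared body.

-- ===== PORT A =====
def format_docstrings (class_matches : List (String × String)) (method_matches : List (String × String)) (property_matches : List (String × String)) : String :=
  class_matches.foldl (fun formatted c =>
    let formatted := formatted ++ ("### " ++ c.1 ++ "\n\n")
    let formatted := formatted ++ (PySem.Str.strip c.2 ++ "\n\n")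
    -- [p for p in property_matches if p]: every element is a 2-tuple, which Python treats as truthy,
    -- so the filter keeps every pair (exact on the typed domain List (String × String))
    let class_properties := property_matches
    let formatted :=
      if class_properties.isEmpty then formatted else
        class_properties.foldl (fun fm p =>
          -- doc.strip().split('\n') is never empty, so [0] is its head (exact)
          let lines := (PySem.Str.split? (PySem.Str.strip p.2) "\n").getD []
          let property_desc := lines.headD ""
          let cleaned_doc := PySem.Str.join "\n" (lines.drop 1)  -- '\n'.join(lst[1:])
          let cleaned_doc := PySem.Str.replace cleaned_doc ">>> " ""
          let fm := fm ++ ("#### **" ++ p.1 ++ "** (Property)\n\n")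
          let fm := fm ++ (PySem.Str.strip property_desc ++ "\n\n")
          fm ++ ("```python\n" ++ cleaned_doc ++ "\n```\n\n")) formatted
    let class_methods := method_matches
    if class_methods.isEmpty then formatted else
      class_methods.foldl (fun fm m =>
        let lines := (PySem.Str.split? (PySem.Str.strip m.2) "\n").getD []
        let method_desc := lines.headD ""
        let cleaned_doc := PySem.Str.join "\n" (lines.drop 1)
        let cleaned_doc := PySem.Str.replace cleaned_doc ">>> " ""
        let fm := fm ++ ("#### **" ++ m.1 ++ "** (Method)\n\n")
        let fm := fm ++ (PySem.Str.strip method_desc ++ "\n\n")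
        fm ++ ("```python\n" ++ cleaned_doc ++ "\n```\n\n")) formatted) ""

-- ===== PORT B =====
def pvSection (label : String) (p : String × String) : String :=
  let lines := (PySem.Str.split? (PySem.Str.strip p.2) "\n").getD []
  let desc := PySem.Str.strip (lines.headD "")   -- lines[0].strip(); split('\n') is never empty
  let cleaned := PySem.Str.replace (PySem.Str.join "\n" (lines.drop 1)) ">>> " ""
  "#### **" ++ p.1 ++ "** (" ++ label ++ ")\n\n" ++ desc ++ "\n\n```python\n" ++ cleaned ++ "\n```\n\n"

def format_docstrings_alt (class_matches : List (String × String)) (method_matches : List (String × String)) (property_matches : List (String × String)) : String :=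
  let body := PySem.Str.join ""
    ([(property_matches, "Property"), (method_matches, "Method")].flatMap
      (fun g => g.1.map (pvSection g.2)))
  PySem.Str.join ""
    (class_matches.map (fun c => "### " ++ c.1 ++ "\n\n" ++ PySem.Str.strip c.2 ++ "\n\n" ++ body))

-- ===== PRECONDITION & SPEC =====
def Spec_format_docstrings (class_matches : List (String × String)) (method_matches : List (String × String)) (property_matches : List (String × String)) (out : String) : Prop := out = format_docstrings_alt class_matches method_matches property_matches
instance (class_matches : List (String × String)) (method_matches : List (String × String)) (property_matches : List (String × String)) (out : String) : Decidable (Spec_format_docstrings class_matches method_matches property_matches out) := by unfold Spec_format_docstrings; infer_instance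

-- ===== CLAIM (what is proved, stated in full; the proofs are below) =====
def Claim_equal_format_docstrings : Prop := ∀ (class_matches : List (String × String)) (method_matches : List (String × String)) (property_matches : List (String × String)), Dom_format_docstrings class_matches method_matches property_matches → Spec_format_docstrings class_matches method_matches property_matches (format_docstrings class_matches method_matches property_matches)

-- ===== LEMMAS AND PROOFS =====

theorem strJoin_nil : PySem.Str.join "" [] = "" := by
  simp [PySem.Str.join, PySem.Chars.join_nil]

theorem strJoin_cons (s : String) (l : List String) :
    PySem.Str.join "" (s :: l) = s ++ PySem.Str.join "" l := by
  apply String.toList_inj.mp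
  simp [PySem.Str.join, String.toList_append]
  cases l <;> simp [PySem.Chars.join_cons_cons, PySem.Chars.join_singleton, PySem.Chars.join_nil]

-- a foldl that only appends to its accumulator is the accumulator followed by the join of the pieces
theorem foldl_append_join {α : Type} (g : α → String) (xs : List α) (acc : String) :
    xs.foldl (fun f p => f ++ g p) acc = acc ++ PySem.Str.join "" (xs.map g) := by
  induction xs generalizing acc with
  | nil => simp [strJoin_nil]
  | cons x t ih => simp [List.foldl_cons, strJoin_cons, ih, String.append_assoc]

-- the section emitted by A for one (name, doc) pair equals pvSection, the per-pair chunk B joins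
theorem strJoin_append (l1 l2 : List String) :
    PySem.Str.join "" (l1 ++ l2) = PySem.Str.join "" l1 ++ PySem.Str.join "" l2 := by
  induction l1 with
  | nil => simp [strJoin_nil]
  | cons x t ih => simp [strJoin_cons, ih, String.append_assoc]

theorem step_prop_eq :
    (fun (fm : String) (p : String × String) =>
      let lines := (PySem.Str.split? (PySem.Str.strip p.2) "\n").getD []
      let property_desc := lines.headD ""
      let cleaned_doc := PySem.Str.join "\n" (lines.drop 1)
      let cleaned_doc := PySem.Str.replace cleaned_doc ">>> " ""
      let fm := fm ++ ("#### **" ++ p.1 ++ "** (Property)\n\n")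
      let fm := fm ++ (PySem.Str.strip property_desc ++ "\n\n")
      fm ++ ("```python\n" ++ cleaned_doc ++ "\n```\n\n"))
    = fun fm p => fm ++ pvSection "Property" p := by
  funext fm p
  simp only [pvSection]
  apply String.toList_inj.mp
  simp [String.toList_append, List.append_assoc]

theorem step_meth_eq :
    (fun (fm : String) (m : String × String) =>
      let lines := (PySem.Str.split? (PySem.Str.strip m.2) "\n").getD []
      let method_desc := lines.headD ""
      let cleaned_doc := PySem.Str.join "\n" (lines.drop 1)
      let cleaned_doc := PySem.Str.replace cleaned_doc ">>> " ""
      let fm := fm ++ ("#### **" ++ m.1 ++ "** (Method)\n\n")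
      let fm := fm ++ (PySem.Str.strip method_desc ++ "\n\n")
      fm ++ ("```python\n" ++ cleaned_doc ++ "\n```\n\n"))
    = fun fm m => fm ++ pvSection "Method" m := by
  funext fm m
  simp only [pvSection]
  apply String.toList_inj.mp
  simp [String.toList_append, List.append_assoc]

theorem format_docstrings_spec : Claim_equal_format_docstrings := by
  intro cm mm pm _
  unfold Spec_format_docstrings format_docstrings format_docstrings_alt
  rw [step_prop_eq, step_meth_eq]
  have hfold : ∀ (xs : List (String × String)) (lab : String) (acc : String),
      (if xs.isEmpty then acc else xs.foldl (fun fm p => fm ++ pvSection lab p) acc)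
        = acc ++ PySem.Str.join "" (xs.map (pvSection lab)) := by
    intro xs lab acc
    cases xs with
    | nil => simp [strJoin_nil]
    | cons x t => rw [if_neg (by simp), foldl_append_join]
  simp only [hfold]
  have hstep : (fun (f : String) (c : String × String) =>
      (((f ++ ("### " ++ c.1 ++ "\n\n")) ++ (PySem.Str.strip c.2 ++ "\n\n"))
        ++ PySem.Str.join "" (pm.map (pvSection "Property")))
        ++ PySem.Str.join "" (mm.map (pvSection "Method")))
      = fun f c => f ++ ("### " ++ c.1 ++ "\n\n" ++ PySem.Str.strip c.2 ++ "\n\n"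
        ++ (PySem.Str.join "" (pm.map (pvSection "Property"))
            ++ PySem.Str.join "" (mm.map (pvSection "Method")))) := by
    funext f c
    apply String.toList_inj.mp
    simp [String.toList_append, List.append_assoc]
  rw [hstep, foldl_append_join]
  simp [List.flatMap_cons, List.flatMap_nil, strJoin_append]
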